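-- pv_equiv track=rewrite | github.com/ambroisie/next-dlp | general/ex3.py | solution
-- ===== SOURCE A (Python) =====
-- def solution(n: int) -> bool:
--     if n < 0:
--         n = -n
--
--     while n:
--         if n % 2 == 1:
--             return False
--         n //= 10
--
--     return True
-- ===== SOURCE B (Python) =====
-- def solution(n: int) -> bool:
--     return all(c in "02468" for c in str(abs(n)))
-- ===== Notes on version B (the rewrite author's own statement) =====
-- stated objective: simpler
-- what changed: Replaces the explicit truncate-by-ten while loop with a one-line check that every character of the decimal representation of the absolute value is an even digit (all truncations are even iff all digits are even).
import Mathlib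
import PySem

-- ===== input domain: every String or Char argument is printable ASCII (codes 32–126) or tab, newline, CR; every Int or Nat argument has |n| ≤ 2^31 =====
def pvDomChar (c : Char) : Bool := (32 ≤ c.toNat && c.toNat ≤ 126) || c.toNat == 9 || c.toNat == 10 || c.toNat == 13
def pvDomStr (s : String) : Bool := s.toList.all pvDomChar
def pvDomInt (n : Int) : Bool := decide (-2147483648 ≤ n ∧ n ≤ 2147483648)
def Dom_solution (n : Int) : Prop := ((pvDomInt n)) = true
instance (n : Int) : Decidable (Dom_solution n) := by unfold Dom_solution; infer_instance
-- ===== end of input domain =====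

-- B replaces A's truncate-by-//10 while loop with a check that every decimal digit of |n| is even (simpler one-liner).


-- ===== PORT A =====
-- the 'while n:' loop; the loop body only ever runs on n ≥ 0 (after the abs), where 'n ≠ 0' is '0 < n'
-- (the '0 < n' guard only makes the recursion total; on the reachable inputs it is exactly 'n ≠ 0')
def solutionLoop (n : Int) : Bool :=
  if 0 < n then
    if PySem.Int.mod n 2 = 1 then false
    else solutionLoop (PySem.Int.floordiv n 10)
  else true
termination_by n.toNat
decreasing_by
  have h1 : PySem.Int.floordiv n 10 = n / 10 := PySem.Int.floordiv_eq_ediv_of_pos (by omega)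
  rw [h1]; omega

def solution (n : Int) : Bool :=
  solutionLoop (if n < 0 then -n else n)

-- ===== PORT B =====
-- the genexp's predicate: 'c in "02468"' for the single character c is membership among its characters
def evenDigit (c : Char) : Bool := ['0','2','4','6','8'].contains c

-- all(c in "02468" for c in str(abs(n)))
def solution_alt (n : Int) : Bool :=
  (PySem.Int.toChars (if n < 0 then -n else n)).all evenDigit

-- ===== PRECONDITION & SPEC =====
def Spec_solution (n : Int) (out : Bool) : Prop := out = solution_alt n
instance (n : Int) (out : Bool) : Decidable (Spec_solution n out) := by unfold Spec_solution; infer_instance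

-- ===== CLAIM (what is proved, stated in full; the proofs are below) =====
def Claim_equal_solution : Prop := ∀ (n : Int), Dom_solution n → Spec_solution n (solution n)

-- ===== LEMMAS AND PROOFS =====

-- A's loop, restated on the Nat side
def loopA (m : Nat) : Bool :=
  if m = 0 then true
  else if m % 2 = 1 then false
  else loopA (m / 10)
decreasing_by exact Nat.div_lt_self (by omega) (by omega)

theorem loopA_zero : loopA 0 = true := by rw [loopA]; simp

theorem loopA_pos {m : Nat} (h : m ≠ 0) :
    loopA m = (decide (m % 2 = 0) && loopA (m / 10)) := by
  rw [loopA, if_neg h]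
  rcases Nat.mod_two_eq_zero_or_one m with he | ho
  · simp [he]
  · simp [ho]

theorem solutionLoop_natCast (m : Nat) : solutionLoop (m : Int) = loopA m := by
  induction m using Nat.strong_induction_on with
  | _ m ih =>
    rw [solutionLoop]
    by_cases h0 : m = 0
    · simp [h0, loopA_zero]
    · have hpos : (0 : Int) < (m : Int) := by exact_mod_cast Nat.pos_of_ne_zero h0
      have hmod : PySem.Int.mod (m : Int) 2 = ((m % 2 : Nat) : Int) := by
        exact_mod_cast PySem.Int.mod_natCast m 2
      have hdiv : PySem.Int.floordiv (m : Int) 10 = ((m / 10 : Nat) : Int) := by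
        exact_mod_cast PySem.Int.floordiv_natCast m 10
      rw [if_pos hpos, hmod, hdiv,
        ih (m / 10) (Nat.div_lt_self (Nat.pos_of_ne_zero h0) (by omega)), loopA_pos h0]
      rcases Nat.mod_two_eq_zero_or_one m with he | ho
      · simp [he]
      · simp [ho]

theorem evenDigit_digitChar (m : Nat) :
    evenDigit (Nat.digitChar (m % 10)) = decide (m % 2 = 0) := by
  have h10 : m % 10 < 10 := Nat.mod_lt _ (by omega)
  have h2 : m % 2 = (m % 10) % 2 := (Nat.mod_mod_of_dvd m (by norm_num)).symm
  rw [h2]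
  set r := m % 10 with hr
  interval_cases r <;> decide

theorem toDigitsCore_all (f : Nat) : ∀ (m : Nat) (acc : List Char), m ≤ f →
    (Nat.toDigitsCore 10 (f + 1) m acc).all evenDigit = (loopA m && acc.all evenDigit) := by
  induction f with
  | zero =>
    intro m acc hm
    have hm0 : m = 0 := Nat.le_zero.mp hm
    subst hm0
    have hstep : Nat.toDigitsCore 10 (0 + 1) 0 acc = Nat.digitChar (0 % 10) :: acc := rfl
    rw [hstep, List.all_cons, evenDigit_digitChar 0, loopA_zero]
    simp
  | succ f ih =>
    intro m acc hm
    rw [Nat.toDigitsCore]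
    by_cases hdiv : m / 10 = 0
    · rw [if_pos hdiv, List.all_cons, evenDigit_digitChar m]
      by_cases h0 : m = 0
      · subst h0; rw [loopA_zero]; simp
      · rw [loopA_pos h0, hdiv, loopA_zero]
        simp
    · rw [if_neg hdiv]
      have hmpos : m ≠ 0 := by intro h; subst h; simp at hdiv
      have hle : m / 10 ≤ f := by
        have := Nat.div_lt_self (Nat.pos_of_ne_zero hmpos) (show 1 < 10 by omega)
        omega
      rw [ih (m / 10) _ hle, loopA_pos hmpos, List.all_cons, evenDigit_digitChar m]
      cases loopA (m / 10) <;> cases (decide (m % 2 = 0)) <;> simp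

theorem toDigits_all (m : Nat) :
    (Nat.toDigits 10 m).all evenDigit = loopA m := by
  have := toDigitsCore_all m m [] (le_refl m)
  simpa [Nat.toDigits] using this

-- ===== VERDICT (by name: the statement is the Claim_ definition above) =====
theorem solution_spec : Claim_equal_solution := by
  intro n _
  unfold Spec_solution solution solution_alt
  have hnn : 0 ≤ (if n < 0 then -n else n) := by split <;> omega
  obtain ⟨m, hm⟩ : ∃ m : Nat, (if n < 0 then -n else n) = (m : Int) :=
    ⟨_, (Int.toNat_of_nonneg hnn).symm⟩
  rw [hm, solutionLoop_natCast]
  have htc : PySem.Int.toChars ((m : Nat) : Int) = Nat.toDigits 10 m := by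
    unfold PySem.Int.toChars
    rw [if_neg (by omega)]
    simp
  rw [htc, toDigits_all]
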